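-- pv_equiv track=rewrite | github.com/vandenberghinc/w3bsite | w3bsite/classes/namecheap/__init__.py | __serialize_string__
-- ===== SOURCE A (Python) =====
-- def __serialize_string__(string, banned_characters=["@"]):
-- 	c, s, l = 0, "", False
-- 	for char in string:
-- 		if char not in banned_characters:
-- 			# regular letter.
-- 			if char.lower() == char:
-- 				s += char.lower()
-- 				l = False
-- 			# capital letter.
-- 			else:
-- 				if c == 0:
-- 					s += char.lower()
-- 				else:
-- 					if l:
-- 						s += char.lower()
-- 					else:
-- 						s += "_"+char.lower()
-- 				l = True
-- 			c += 1
-- 	return s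
-- ===== SOURCE B (Python) =====
-- def __serialize_string__(string, banned_characters=["@"]):
-- 	filtered = [ch for ch in string if ch not in banned_characters]
-- 	prevs = [None] + filtered[:-1]
-- 	parts = []
-- 	for prev, ch in zip(prevs, filtered):
-- 		if ch.lower() != ch and prev is not None and prev.lower() == prev:
-- 			parts.append("_")
-- 		parts.append(ch.lower())
-- 	return "".join(parts)
-- ===== Notes on version B (the rewrite author's own statement) =====
-- stated objective: alternative
-- what changed: Replaced the single stateful pass (kept-char counter c, uppercase flag l, string concatenation) by a filter pass producing the kept characters followed by a stateless pairwise pass over (previous, current) zipped pairs that decides the underscore from the previous filtered character alone, joined at the end.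
import Mathlib
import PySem

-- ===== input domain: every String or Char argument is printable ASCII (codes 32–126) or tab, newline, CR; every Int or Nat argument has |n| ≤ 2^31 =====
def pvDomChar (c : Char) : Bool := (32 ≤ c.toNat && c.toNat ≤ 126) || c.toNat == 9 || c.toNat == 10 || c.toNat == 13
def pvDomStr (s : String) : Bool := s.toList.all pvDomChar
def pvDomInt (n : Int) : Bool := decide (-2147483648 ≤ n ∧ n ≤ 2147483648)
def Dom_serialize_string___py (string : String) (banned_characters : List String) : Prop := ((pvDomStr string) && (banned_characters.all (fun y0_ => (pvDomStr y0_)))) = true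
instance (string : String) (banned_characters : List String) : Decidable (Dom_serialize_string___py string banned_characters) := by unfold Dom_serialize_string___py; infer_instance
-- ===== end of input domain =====

-- B replaces A's single stateful pass (counter c, flag l, string concatenation) by a filter pass
-- plus a stateless pairwise pass over (previous, current) zipped pairs (objective: alternative).


-- ===== PORT A =====
-- one loop iteration of A: state (c = number of kept chars, s = output so far, l = last kept char was capital)
def stepA (banned_characters : List String) (st : Nat × List Char × Bool) (char : Char) : Nat × List Char × Bool :=
  if String.mk [char] ∉ banned_characters then
    if PySem.Chars.lowerChar char = char then
      (st.1 + 1, st.2.1 ++ [PySem.Chars.lowerChar char], false)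
    else
      if st.1 = 0 then
        (st.1 + 1, st.2.1 ++ [PySem.Chars.lowerChar char], true)
      else if st.2.2 then
        (st.1 + 1, st.2.1 ++ [PySem.Chars.lowerChar char], true)
      else
        (st.1 + 1, st.2.1 ++ ['_', PySem.Chars.lowerChar char], true)
  else st

def serialize_string___py (string : String) (banned_characters : List String) : String :=
  String.mk (string.toList.foldl (stepA banned_characters) (0, [], false)).2.1

-- ===== PORT B =====
-- prev.lower() == prev for a kept previous char; False for None
def prevLower : Option Char → Bool
  | some p => PySem.Chars.lowerChar p == p
  | none => false

-- what B emits for one (previous, current) pair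
def emitB (prev : Option Char) (char : Char) : List Char :=
  (if PySem.Chars.lowerChar char ≠ char ∧ prevLower prev = true then ['_'] else [])
    ++ [PySem.Chars.lowerChar char]

def serialize_string___py_alt (string : String) (banned_characters : List String) : String :=
  let filtered := string.toList.filter (fun ch => decide (String.mk [ch] ∉ banned_characters))
  let prevs := none :: filtered.dropLast.map some
  String.mk ((prevs.zip filtered).flatMap (fun pc => emitB pc.1 pc.2))

-- ===== PRECONDITION & SPEC =====
def Spec_serialize_string___py (string : String) (banned_characters : List String) (out : String) : Prop := out = serialize_string___py_alt string banned_characters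
instance (string : String) (banned_characters : List String) (out : String) : Decidable (Spec_serialize_string___py string banned_characters out) := by unfold Spec_serialize_string___py; infer_instance

-- ===== CLAIM (what is proved, stated in full; the proofs are below) =====
def Claim_equal_serialize_string___py : Prop := ∀ (string : String) (banned_characters : List String), Dom_serialize_string___py string banned_characters → Spec_serialize_string___py string banned_characters (serialize_string___py string banned_characters)

-- ===== LEMMAS AND PROOFS =====

-- recursive form of B's pairwise pass, carrying the previous kept char
def emitRec : Option Char → List Char → List Char
  | _, [] => []
  | p, c :: rest => emitB p c ++ emitRec (some c) rest

-- A's flag l as a function of the previous kept char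
def flagOf : Option Char → Bool
  | some q => ! (PySem.Chars.lowerChar q == q)
  | none => false

theorem zip_emit (l : List Char) (p : Option Char) :
    ((p :: l.dropLast.map some).zip l).flatMap (fun pc => emitB pc.1 pc.2) = emitRec p l := by
  induction l generalizing p with
  | nil => simp [emitRec]
  | cons c rest ih =>
    cases rest with
    | nil => simp [emitRec]
    | cons d rest' =>
      rw [show emitRec p (c :: d :: rest') = emitB p c ++ emitRec (some c) (d :: rest') from rfl,
        ← ih (some c)]
      simp [List.dropLast_cons₂]

theorem foldA_emit (banned : List String) (rest : List Char) :
    ∀ (s : List Char) (p : Option Char) (c : Nat), (c = 0 ↔ p = none) →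
    (rest.foldl (stepA banned) (c, s, flagOf p)).2.1
      = s ++ emitRec p (rest.filter (fun ch => decide (String.mk [ch] ∉ banned))) := by
  induction rest with
  | nil => intro s p c _; simp [emitRec]
  | cons ch rest' ih =>
    intro s p c hcp
    by_cases hb : String.mk [ch] ∈ banned
    · have hst : stepA banned (c, s, flagOf p) ch = (c, s, flagOf p) := by simp [stepA, hb]
      rw [List.foldl_cons, hst, List.filter_cons, if_neg (by simp [hb])]
      exact ih s p c hcp
    · rw [List.foldl_cons, List.filter_cons, if_pos (by simp [hb])]
      by_cases hl : PySem.Chars.lowerChar ch = ch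
      · have hstep : stepA banned (c, s, flagOf p) ch
            = (c + 1, s ++ [PySem.Chars.lowerChar ch], flagOf (some ch)) := by
          simp [stepA, hb, hl, flagOf]
        rw [hstep, ih _ (some ch) (c + 1) (by simp)]
        have hemit : emitB p ch = [PySem.Chars.lowerChar ch] := by
          simp [emitB, hl]
        simp [emitRec, hemit]
      · by_cases hc : c = 0
        · have hp : p = none := hcp.mp hc
          have hstep : stepA banned (c, s, flagOf p) ch
              = (c + 1, s ++ [PySem.Chars.lowerChar ch], flagOf (some ch)) := by
            simp [stepA, hb, hl, hc, flagOf]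
          rw [hstep, ih _ (some ch) (c + 1) (by simp)]
          have hemit : emitB p ch = [PySem.Chars.lowerChar ch] := by
            simp [emitB, hp, prevLower]
          simp [emitRec, hemit]
        · obtain ⟨q, hq⟩ : ∃ q, p = some q := by
            cases p with
            | none => exact absurd (hcp.mpr rfl) hc
            | some q => exact ⟨q, rfl⟩
          subst hq
          by_cases hql : PySem.Chars.lowerChar q = q
          · have hstep : stepA banned (c, s, flagOf (some q)) ch
                = (c + 1, s ++ ['_', PySem.Chars.lowerChar ch], flagOf (some ch)) := by
              simp [stepA, hb, hl, hc, flagOf, hql]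
            rw [hstep, ih _ (some ch) (c + 1) (by simp)]
            have hemit : emitB (some q) ch = ['_', PySem.Chars.lowerChar ch] := by
              simp [emitB, hl, prevLower, hql]
            simp [emitRec, hemit]
          · have hstep : stepA banned (c, s, flagOf (some q)) ch
                = (c + 1, s ++ [PySem.Chars.lowerChar ch], flagOf (some ch)) := by
              simp [stepA, hb, hl, hc, flagOf, hql]
            rw [hstep, ih _ (some ch) (c + 1) (by simp)]
            have hemit : emitB (some q) ch = [PySem.Chars.lowerChar ch] := by
              simp [emitB, prevLower, hql]
            simp [emitRec, hemit]

-- ===== VERDICT (by name: the statement is the Claim_ definition above) =====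
theorem serialize_string___py_spec : Claim_equal_serialize_string___py := by
  intro string banned_characters _
  unfold Spec_serialize_string___py
  simp only [serialize_string___py, serialize_string___py_alt]
  rw [zip_emit]
  have := foldA_emit banned_characters string.toList [] none 0 (by simp)
  simp only [flagOf] at this
  rw [this]
  simp
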